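-- pv_equiv track=rewrite | github.com/blitzyoo55-ux/hollowforge | hollowforge/backend/app/routes/benchmark.py | _aggregate_benchmark_status
-- ===== SOURCE A (Python) =====
-- _TERMINAL_GENERATION_STATES = {"completed", "failed", "cancelled"}
--
-- def _aggregate_benchmark_status(generation_statuses: list[str]) -> str:
--     if not generation_statuses:
--         return "pending"
--     if any(status in {"queued", "running"} for status in generation_statuses):
--         return "running"
--     if all(status == "completed" for status in generation_statuses):
--         return "completed"
--     if all(status in _TERMINAL_GENERATION_STATES for status in generation_statuses):
--         return "failed"
--     return "running"
-- ===== SOURCE B (Python) =====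
-- _RANK = {"completed": 1, "failed": 2, "cancelled": 2, "queued": 3, "running": 3}
-- _NAMES = ["pending", "completed", "failed", "running"]
--
-- def _aggregate_benchmark_status(generation_statuses: list[str]) -> str:
--     # severity lattice: pending(0) < completed(1) < failed(2) < running(3);
--     # unknown statuses rank 3 ("still running" per A's fallthrough)
--     rank = 0
--     for status in generation_statuses:
--         rank = max(rank, _RANK.get(status, 3))
--     return _NAMES[rank]
-- ===== Notes on version B (the rewrite author's own statement) =====
-- stated objective: alternative
-- what changed: Replaces A's three staged any/all short-circuit scans with a single fold over a four-level severity lattice: each status is mapped to a rank (pending 0 < completed 1 < failed 2 < running 3, unknown 3) and the answer is the name of the maximum rank.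
import Mathlib
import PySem

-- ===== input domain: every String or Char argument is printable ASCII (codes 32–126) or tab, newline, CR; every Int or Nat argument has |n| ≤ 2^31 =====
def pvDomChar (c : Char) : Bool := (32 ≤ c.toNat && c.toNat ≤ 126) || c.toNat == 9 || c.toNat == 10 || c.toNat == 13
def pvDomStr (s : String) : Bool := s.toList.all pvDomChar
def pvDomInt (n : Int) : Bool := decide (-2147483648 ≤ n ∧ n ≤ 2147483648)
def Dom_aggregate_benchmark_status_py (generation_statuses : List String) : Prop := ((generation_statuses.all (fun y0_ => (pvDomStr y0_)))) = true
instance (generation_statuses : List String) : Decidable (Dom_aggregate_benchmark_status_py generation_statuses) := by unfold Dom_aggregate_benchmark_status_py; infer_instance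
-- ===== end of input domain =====

-- B replaces A's three staged short-circuit scans by one fold over a four-level
-- severity lattice (pending < completed < failed < running), taking the max rank (alternative).

-- module-level constant _TERMINAL_GENERATION_STATES (used by A)
def pvTerminalStates : PySem.Set String := PySem.Set.ofList ["completed", "failed", "cancelled"]

-- ===== PORT A =====
def aggregate_benchmark_status_py (generation_statuses : List String) : String :=
  if generation_statuses = [] then "pending"
  else if generation_statuses.any
      (fun status => PySem.Set.contains (PySem.Set.ofList ["queued", "running"]) status) then "running"
  else if generation_statuses.all (fun status => status == "completed") then "completed"
  else if generation_statuses.all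
      (fun status => PySem.Set.contains pvTerminalStates status) then "failed"
  else "running"

-- ===== PORT B =====
-- module-level constants _RANK and _NAMES of Source B
def pvRankDict : PySem.Dict String Int :=
  PySem.Dict.mk [("completed", 1), ("failed", 2), ("cancelled", 2), ("queued", 3), ("running", 3)]
def pvNames : List String := ["pending", "completed", "failed", "running"]

def aggregate_benchmark_status_py_alt (generation_statuses : List String) : String :=
  let rank : Int := generation_statuses.foldl
    (fun rank status => max rank (PySem.Dict.getD pvRankDict status 3)) 0
  -- _NAMES[rank]: rank is always 0..3, so the index is in range; .getD "" only totalizes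
  (PySem.List.pyGet? pvNames rank).getD ""

-- ===== PRECONDITION & SPEC =====
def Spec_aggregate_benchmark_status_py (generation_statuses : List String) (out : String) : Prop := out = aggregate_benchmark_status_py_alt generation_statuses
instance (generation_statuses : List String) (out : String) : Decidable (Spec_aggregate_benchmark_status_py generation_statuses out) := by unfold Spec_aggregate_benchmark_status_py; infer_instance

-- ===== CLAIM (what is proved, stated in full; the proofs are below) =====
def Claim_equal_aggregate_benchmark_status_py : Prop := ∀ (generation_statuses : List String), Dom_aggregate_benchmark_status_py generation_statuses → Spec_aggregate_benchmark_status_py generation_statuses (aggregate_benchmark_status_py generation_statuses)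

-- ===== LEMMAS AND PROOFS =====

-- the per-status rank, as used by B's fold
def pvRankOf (s : String) : Int := PySem.Dict.getD pvRankDict s 3

theorem pvRankOf_char (s : String) :
    pvRankOf s = if s = "completed" then 1 else if s = "failed" ∨ s = "cancelled" then 2 else 3 := by
  unfold pvRankOf pvRankDict
  simp only [PySem.Dict.getD, PySem.Dict.get?_mk_cons, beq_iff_eq]
  split_ifs with a b c d e <;> simp_all [PySem.Dict.get?] <;> tauto

theorem pvRankOf_le3 (s : String) : pvRankOf s ≤ 3 := by
  rw [pvRankOf_char]; split_ifs <;> norm_num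

def pvFold (gs : List String) (a : Int) : Int :=
  gs.foldl (fun rank status => max rank (pvRankOf status)) a

theorem pvFold_init_le (gs : List String) (a : Int) : a ≤ pvFold gs a := by
  induction gs generalizing a with
  | nil => simp [pvFold]
  | cons x xs ih =>
    calc a ≤ max a (pvRankOf x) := le_max_left ..
    _ ≤ pvFold xs (max a (pvRankOf x)) := ih _
    _ = pvFold (x :: xs) a := rfl

theorem pvFold_mem_le (gs : List String) (a : Int) (s : String) (hs : s ∈ gs) :
    pvRankOf s ≤ pvFold gs a := by
  induction gs generalizing a with
  | nil => cases hs
  | cons x xs ih =>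
    rcases List.mem_cons.1 hs with rfl | hs'
    · exact le_trans (le_max_right a _) (pvFold_init_le xs _)
    · exact ih _ hs' 

theorem pvFold_cases (gs : List String) (a : Int) :
    pvFold gs a = a ∨ ∃ s ∈ gs, pvFold gs a = pvRankOf s := by
  induction gs generalizing a with
  | nil => exact Or.inl rfl
  | cons x xs ih =>
    have hrw : pvFold (x :: xs) a = pvFold xs (max a (pvRankOf x)) := rfl
    rw [hrw]
    rcases ih (max a (pvRankOf x)) with h | ⟨s, hs, h⟩
    · rcases max_choice a (pvRankOf x) with hm | hm
      · rw [h, hm]; exact Or.inl rfl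
      · exact Or.inr ⟨x, List.mem_cons_self .., by rw [h, hm]⟩
    · exact Or.inr ⟨s, List.mem_cons_of_mem _ hs, h⟩

-- if the fold's value is known, B returns the corresponding name
theorem pvB_eq (gs : List String) (r : Int)
    (h : pvFold gs 0 = r) :
    aggregate_benchmark_status_py_alt gs = (PySem.List.pyGet? pvNames r).getD "" := by
  unfold aggregate_benchmark_status_py_alt
  show (PySem.List.pyGet? pvNames (pvFold gs 0)).getD "" = _
  rw [h]

theorem pv_main (gs : List String) :
    aggregate_benchmark_status_py gs = aggregate_benchmark_status_py_alt gs := by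
  unfold aggregate_benchmark_status_py
  by_cases h0 : gs = []
  · subst h0; rfl
  · by_cases h1 : ∃ s ∈ gs, s = "queued" ∨ s = "running"
    · -- some rank-3 status present → fold = 3
      obtain ⟨s, hs, hqr⟩ := h1
      have hr3 : pvRankOf s = 3 := by
        rw [pvRankOf_char]; rcases hqr with h | h <;> simp [h]
      have hub : pvFold gs 0 ≤ 3 := by
        rcases pvFold_cases gs 0 with h | ⟨t, _, h⟩
        · rw [h]; norm_num
        · rw [h]; exact pvRankOf_le3 t
      have hlb : (3 : Int) ≤ pvFold gs 0 := hr3 ▸ pvFold_mem_le gs 0 s hs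
      rw [pvB_eq gs 3 (le_antisymm hub hlb)]
      have ha : (gs.any fun status =>
          PySem.Set.contains (PySem.Set.ofList ["queued", "running"]) status) = true := by
        simp only [List.any_eq_true, PySem.Set.contains_iff, PySem.Set.mem_ofList, List.mem_cons]
        exact ⟨s, hs, hqr.imp id Or.inl⟩
      rw [if_neg h0, if_pos ha]
      rfl
    · have hnot3 : ∀ s ∈ gs, s ≠ "queued" ∧ s ≠ "running" := by
        intro s hs
        constructor <;> intro h <;> exact h1 ⟨s, hs, by simp [h]⟩
      have ha1 : ¬ ((gs.any fun status =>
          PySem.Set.contains (PySem.Set.ofList ["queued", "running"]) status) = true) := by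
        simp only [List.any_eq_true, PySem.Set.contains_iff, PySem.Set.mem_ofList, List.mem_cons]
        rintro ⟨x, hx, h | h | h⟩
        · exact h1 ⟨x, hx, Or.inl h⟩
        · exact h1 ⟨x, hx, Or.inr h⟩
        · simp at h
      by_cases h2 : ∀ s ∈ gs, s = "completed"
      · -- nonempty, all completed → fold = 1
        obtain ⟨x, hx⟩ := List.exists_mem_of_ne_nil gs h0
        have hub : pvFold gs 0 ≤ 1 := by
          rcases pvFold_cases gs 0 with h | ⟨t, ht, h⟩
          · rw [h]; norm_num
          · rw [h, pvRankOf_char, if_pos (h2 t ht)]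
        have hlb : (1 : Int) ≤ pvFold gs 0 := by
          have := pvFold_mem_le gs 0 x hx
          rw [pvRankOf_char, if_pos (h2 x hx)] at this
          exact this
        rw [pvB_eq gs 1 (le_antisymm hub hlb)]
        have ha2 : (gs.all fun status => status == "completed") = true := by
          simpa [List.all_eq_true] using h2
        rw [if_neg h0, if_neg ha1, if_pos ha2]
        rfl
      · have ha2 : ¬ ((gs.all fun status => status == "completed") = true) := by
          simpa [List.all_eq_true] using h2
        push Not at h2
        obtain ⟨y, hy, hyne⟩ := h2
        by_cases h3 : ∀ s ∈ gs, s ∈ (pvTerminalStates : List String)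
        · -- all terminal, some non-completed → fold = 2
          have hterm : ∀ s ∈ gs, s = "completed" ∨ s = "failed" ∨ s = "cancelled" := by
            intro s hs
            have := h3 s hs
            simpa [pvTerminalStates, PySem.Set.mem_ofList] using this
          have hub : pvFold gs 0 ≤ 2 := by
            rcases pvFold_cases gs 0 with h | ⟨t, ht, h⟩
            · rw [h]; norm_num
            · rw [h, pvRankOf_char]
              rcases hterm t ht with h' | h' | h' <;> simp [h']
          have hlb : (2 : Int) ≤ pvFold gs 0 := by
            have hy2 : pvRankOf y = 2 := by
              rw [pvRankOf_char, if_neg hyne, if_pos]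
              rcases hterm y hy with h' | h'
              · exact absurd h' hyne
              · exact h'
            exact hy2 ▸ pvFold_mem_le gs 0 y hy
          rw [pvB_eq gs 2 (le_antisymm hub hlb)]
          have ha3 : (gs.all fun status => PySem.Set.contains pvTerminalStates status) = true := by
            simp only [List.all_eq_true, PySem.Set.contains_iff]
            exact h3
          rw [if_neg h0, if_neg ha1, if_neg ha2, if_pos ha3]
          rfl
        · -- some non-terminal (and non-queued/running) status → rank 3 → fold = 3
          push Not at h3
          obtain ⟨z, hz, hznt⟩ := h3
          have hz3 : pvRankOf z = 3 := by
            rw [pvRankOf_char]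
            have : z ≠ "completed" ∧ z ≠ "failed" ∧ z ≠ "cancelled" := by
              refine ⟨?_, ?_, ?_⟩ <;> intro h <;>
                exact hznt (by simp [pvTerminalStates, PySem.Set.mem_ofList, h])
            simp [this.1, this.2.1, this.2.2]
          have hub : pvFold gs 0 ≤ 3 := by
            rcases pvFold_cases gs 0 with h | ⟨t, _, h⟩
            · rw [h]; norm_num
            · rw [h]; exact pvRankOf_le3 t
          have hlb : (3 : Int) ≤ pvFold gs 0 := hz3 ▸ pvFold_mem_le gs 0 z hz
          rw [pvB_eq gs 3 (le_antisymm hub hlb)]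
          have ha3 : ¬ ((gs.all fun status => PySem.Set.contains pvTerminalStates status) = true) := by
            simp only [List.all_eq_true, PySem.Set.contains_iff]
            intro h
            exact hznt (h z hz)
          rw [if_neg h0, if_neg ha1, if_neg ha2, if_neg ha3]
          rfl

-- ===== VERDICT (by name: the statement is the Claim_ definition above) =====
theorem aggregate_benchmark_status_py_spec : Claim_equal_aggregate_benchmark_status_py := by
  intro gs _
  unfold Spec_aggregate_benchmark_status_py
  exact pv_main gs
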